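-- pv_equiv track=rewrite | github.com/sangrokhan/remote_work | graph_excel/read_pdf.py | _merge_positions
-- ===== SOURCE A (Python) =====
-- def _merge_positions(values, tolerance):
--     if not values:
--         return []
--
--     sorted_values = sorted(values)
--     merged = [sorted_values[0]]
--     for value in sorted_values[1:]:
--         if value <= merged[-1] + tolerance:
--             continue
--         merged.append(value)
--     return merged
-- ===== SOURCE B (Python) =====
-- def _merge_positions(values, tolerance):
--     sv = sorted(values)
--     n = len(sv)
--     merged = []
--     i = 0
--     while i < n:
--         rep = sv[i]
--         merged.append(rep)
--         # hand-written bisect_right: first index in (i, n) with sv[idx] > rep + tolerance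
--         lo, hi = i + 1, n
--         while lo < hi:
--             mid = (lo + hi) // 2
--             if sv[mid] <= rep + tolerance:
--                 lo = mid + 1
--             else:
--                 hi = mid
--         i = lo
--     return merged
-- ===== Notes on version B (the rewrite author's own statement) =====
-- stated objective: alternative
-- what changed: After sorting, B drives an index loop that picks sorted_values[i] as a representative and jumps i past all values within tolerance with a hand-written bisect_right (binary search), instead of A's linear fold that compares each value with the last appended representative.
import Mathlib
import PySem

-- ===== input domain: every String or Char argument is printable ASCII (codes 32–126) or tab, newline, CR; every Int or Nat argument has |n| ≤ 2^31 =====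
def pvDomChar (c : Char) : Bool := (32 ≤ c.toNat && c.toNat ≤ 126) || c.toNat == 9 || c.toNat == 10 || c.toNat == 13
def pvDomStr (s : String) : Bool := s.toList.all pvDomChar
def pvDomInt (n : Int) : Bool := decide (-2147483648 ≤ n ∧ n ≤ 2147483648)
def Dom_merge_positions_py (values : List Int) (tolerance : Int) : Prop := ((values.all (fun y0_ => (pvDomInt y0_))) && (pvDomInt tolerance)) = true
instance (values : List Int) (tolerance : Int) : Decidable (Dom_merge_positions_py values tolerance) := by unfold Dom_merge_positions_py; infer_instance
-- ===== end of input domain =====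

-- B replaces A's linear fold (compare each value with the last appended representative)
-- by an index loop that jumps past each merged group with a hand-written binary search
-- (bisect_right); same return value, a genuinely different traversal (objective: alternative).

-- ===== PORT A =====
-- literal port of A: early return on empty, sort, seed merged with sorted_values[0],
-- fold over sorted_values[1:] comparing against merged[-1]
def merge_positions_py (values : List Int) (tolerance : Int) : List Int :=
  if values = [] then []
  else
    let sorted_values := PySem.List.sorted values (fun x => x) false
    let merged := [sorted_values.getD 0 0]   -- sorted_values[0]; in range: values ≠ []
    (PySem.List.slice sorted_values (some 1) none).foldl
      (fun merged value =>
        if value ≤ PySem.List.pyGetD merged (-1) 0 + tolerance then merged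
        else merged ++ [value]) merged

-- ===== PORT B =====
-- Source B's inner while loop (fuel = hi - lo at the call site makes the loop structural):
-- first index in [lo, hi) with sv[idx] > x, else hi (hand-written bisect_right)
def pvBisectF (sv : List Int) (x : Int) : Nat → Nat → Nat → Nat
  | 0, lo, _ => lo
  | f + 1, lo, hi =>
    if lo < hi then
      let mid := (lo + hi) / 2
      if sv.getD mid 0 ≤ x then pvBisectF sv x f (mid + 1) hi
      else pvBisectF sv x f lo mid
    else lo

def pvBisect (sv : List Int) (x : Int) (lo hi : Nat) : Nat :=
  pvBisectF sv x (hi - lo) lo hi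

-- Source B's outer while loop over the index i (fuel = sv.length - i at the call site)
def pvMergeLoopF (sv : List Int) (tol : Int) : Nat → Nat → List Int
  | 0, _ => []
  | f + 1, i =>
    if i < sv.length then
      let rep := sv.getD i 0
      rep :: pvMergeLoopF sv tol f (pvBisect sv (rep + tol) (i + 1) sv.length)
    else []

def merge_positions_py_alt (values : List Int) (tolerance : Int) : List Int :=
  let sv := PySem.List.sorted values (fun x => x) false
  pvMergeLoopF sv tolerance sv.length 0

-- ===== PRECONDITION & SPEC =====
def Spec_merge_positions_py (values : List Int) (tolerance : Int) (out : List Int) : Prop := out = merge_positions_py_alt values tolerance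
instance (values : List Int) (tolerance : Int) (out : List Int) : Decidable (Spec_merge_positions_py values tolerance out) := by unfold Spec_merge_positions_py; infer_instance

-- ===== CLAIM (what is proved, stated in full; the proofs are below) =====
def Claim_equal_merge_positions_py : Prop := ∀ (values : List Int) (tolerance : Int), Dom_merge_positions_py values tolerance → Spec_merge_positions_py values tolerance (merge_positions_py values tolerance)

-- ===== LEMMAS AND PROOFS =====

-- reference form of the merged list, shared by both characterizations
def pvGreedy (tol : Int) (rep : Int) : List Int → List Int
  | [] => []
  | v :: l => if v ≤ rep + tol then pvGreedy tol rep l else v :: pvGreedy tol v l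

-- A's fold with a nonempty accumulator acc ++ [rep] produces acc ++ rep :: pvGreedy tol rep l
theorem pvFold_eq_greedy (tol : Int) (l : List Int) : ∀ (acc : List Int) (rep : Int),
    l.foldl (fun merged value =>
        if value ≤ PySem.List.pyGetD merged (-1) 0 + tol then merged
        else merged ++ [value]) (acc ++ [rep])
      = acc ++ rep :: pvGreedy tol rep l := by
  induction l with
  | nil => intro acc rep; simp [pvGreedy]
  | cons v l ih =>
    intro acc rep
    simp only [List.foldl_cons, PySem.List.pyGetD_neg_one_append_singleton, pvGreedy]
    by_cases h : v ≤ rep + tol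
    · simp [h, ih]
    · simp only [if_neg h]
      rw [show acc ++ [rep] ++ [v] = (acc ++ [rep]) ++ [v] from by simp,
          ih (acc ++ [rep]) v]
      simp

-- pvGreedy skips a whole block of values within tolerance of the representative
theorem pvGreedy_skip (tol rep : Int) (l1 l2 : List Int) (h : ∀ v ∈ l1, v ≤ rep + tol) :
    pvGreedy tol rep (l1 ++ l2) = pvGreedy tol rep l2 := by
  induction l1 with
  | nil => rfl
  | cons v l1 ih =>
    simp only [List.cons_append, pvGreedy, if_pos (h v (by simp))]
    exact ih (fun w hw => h w (by simp [hw]))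

-- monotone-list abbreviation used by the binary-search lemmas
def pvMono (sv : List Int) : Prop := ∀ p q : Nat, p ≤ q → q < sv.length → sv.getD p 0 ≤ sv.getD q 0

-- the binary search never moves left of lo
theorem pvBisectF_ge (sv : List Int) (x : Int) : ∀ (f lo hi : Nat),
    lo ≤ pvBisectF sv x f lo hi := by
  intro f
  induction f with
  | zero => intro lo hi; simp [pvBisectF]
  | succ f ih =>
    intro lo hi
    simp only [pvBisectF]
    split_ifs with h1 h2
    · have := ih ((lo + hi) / 2 + 1) hi; omega
    · exact ih lo ((lo + hi) / 2)
    · exact le_rfl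

-- the binary search stays within [lo, hi]
theorem pvBisectF_le (sv : List Int) (x : Int) : ∀ (f lo hi : Nat),
    lo ≤ hi → pvBisectF sv x f lo hi ≤ hi := by
  intro f
  induction f with
  | zero => intro lo hi h; simpa [pvBisectF] using h
  | succ f ih =>
    intro lo hi h
    simp only [pvBisectF]
    split_ifs with h1 h2
    · exact ih ((lo + hi) / 2 + 1) hi (by omega)
    · have := ih lo ((lo + hi) / 2) (by omega); omega
    · exact h

-- every index in [lo, result) carries a value ≤ x
theorem pvBisectF_below (sv : List Int) (x : Int) (hm : pvMono sv) : ∀ (f lo hi : Nat),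
    hi ≤ sv.length → ∀ j, lo ≤ j → j < pvBisectF sv x f lo hi → sv.getD j 0 ≤ x := by
  intro f
  induction f with
  | zero => intro lo hi _ j hj hjk; simp [pvBisectF] at hjk; omega
  | succ f ih =>
    intro lo hi hhi j hj hjk
    simp only [pvBisectF] at hjk
    split_ifs at hjk with h1 h2
    · by_cases hjm : j ≤ (lo + hi) / 2
      · exact le_trans (hm j ((lo + hi) / 2) hjm (by omega)) h2
      · exact ih ((lo + hi) / 2 + 1) hi hhi j (by omega) hjk
    · exact ih lo ((lo + hi) / 2) (by omega) j hj hjk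
    · omega

-- with enough fuel, a result inside [lo, hi) carries a value exceeding x
theorem pvBisectF_above (sv : List Int) (x : Int) : ∀ (f lo hi : Nat),
    hi ≤ sv.length → hi - lo ≤ f → pvBisectF sv x f lo hi < hi →
      x < sv.getD (pvBisectF sv x f lo hi) 0 := by
  intro f
  induction f with
  | zero => intro lo hi _ hfu hres; simp [pvBisectF] at hres; omega
  | succ f ih =>
    intro lo hi hhi hfu hres
    simp only [pvBisectF] at hres ⊢
    split_ifs at hres ⊢ with h1 h2
    · exact ih ((lo + hi) / 2 + 1) hi hhi (by omega) hres
    · by_cases hr : pvBisectF sv x f lo ((lo + hi) / 2) < (lo + hi) / 2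
      · exact ih lo ((lo + hi) / 2) (by omega) (by omega) hr
      · have hle := pvBisectF_le sv x f lo ((lo + hi) / 2) (by omega)
        have heq : pvBisectF sv x f lo ((lo + hi) / 2) = (lo + hi) / 2 := by omega
        rw [heq]; omega
    · omega

-- B's loop from index i (with fuel covering the rest of the list) yields sv[i]
-- followed by pvGreedy over the rest of the list
theorem pvMergeLoopF_eq_greedy (sv : List Int) (tol : Int) (hm : pvMono sv) : ∀ (f i : Nat),
    sv.length - i ≤ f → i < sv.length →
      pvMergeLoopF sv tol f i = sv.getD i 0 :: pvGreedy tol (sv.getD i 0) (sv.drop (i + 1)) := by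
  intro f
  induction f with
  | zero => intro i hf hi; omega
  | succ f ih =>
    intro i hf hi
    simp only [pvMergeLoopF, if_pos hi]
    have hk1 : i + 1 ≤ pvBisect sv (sv.getD i 0 + tol) (i + 1) sv.length :=
      pvBisectF_ge sv (sv.getD i 0 + tol) (sv.length - (i + 1)) (i + 1) sv.length
    have hk2 : pvBisect sv (sv.getD i 0 + tol) (i + 1) sv.length ≤ sv.length :=
      pvBisectF_le sv (sv.getD i 0 + tol) (sv.length - (i + 1)) (i + 1) sv.length (by omega)
    have hbelow := pvBisectF_below sv (sv.getD i 0 + tol) hm (sv.length - (i + 1)) (i + 1)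
      sv.length le_rfl
    have habove := pvBisectF_above sv (sv.getD i 0 + tol) (sv.length - (i + 1)) (i + 1)
      sv.length le_rfl le_rfl
    rw [show pvBisect sv (sv.getD i 0 + tol) (i + 1) sv.length
          = pvBisectF sv (sv.getD i 0 + tol) (sv.length - (i + 1)) (i + 1) sv.length from rfl]
      at hk1 hk2
    generalize hkk : pvBisectF sv (sv.getD i 0 + tol) (sv.length - (i + 1)) (i + 1) sv.length = k
      at hk1 hk2 hbelow habove ⊢
    simp only [pvBisect, hkk]
    -- split the tail at index k
    have hsplit : sv.drop (i + 1) = (sv.drop (i + 1)).take (k - (i + 1)) ++ sv.drop k := by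
      conv_lhs => rw [← List.take_append_drop (k - (i + 1)) (sv.drop (i + 1))]
      rw [List.drop_drop]
      have hke : i + 1 + (k - (i + 1)) = k := by omega
      rw [hke]
    have hblock : ∀ v ∈ (sv.drop (i + 1)).take (k - (i + 1)), v ≤ sv.getD i 0 + tol := by
      intro v hv
      rw [List.mem_iff_getElem] at hv
      obtain ⟨j, hj, rfl⟩ := hv
      simp only [List.length_take, List.length_drop, lt_min_iff] at hj
      rw [List.getElem_take, List.getElem_drop]
      have hb := hbelow (i + 1 + j) (by omega) (by omega)
      rw [List.getD_eq_getElem sv 0 (by omega)] at hb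
      exact hb
    rw [hsplit, pvGreedy_skip tol (sv.getD i 0) _ _ hblock]
    by_cases hkl : k < sv.length
    · have hab : sv.getD i 0 + tol < sv.getD k 0 := habove hkl
      rw [List.drop_eq_getElem_cons hkl]
      have hgd : sv.getD k 0 = sv[k] := List.getD_eq_getElem sv 0 hkl
      rw [pvGreedy]
      rw [if_neg (by rw [← hgd]; omega)]
      rw [ih k (by omega) hkl, hgd]
    · have hke : k = sv.length := by omega
      have hdk : sv.drop k = [] := by simp [hke]
      rw [hdk, pvGreedy]
      cases f with
      | zero => simp [pvMergeLoopF]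
      | succ f => simp [pvMergeLoopF, hke]

-- sortedness of the Python sort, in the getD form the lemmas above use
theorem pvMono_sorted (values : List Int) : pvMono (PySem.List.sorted values (fun x => x) false) := by
  intro p q hpq hq
  rw [List.getD_eq_getElem _ 0 (by omega), List.getD_eq_getElem _ 0 hq]
  exact PySem.List.sorted_id_getElem_mono values hpq hq

-- ===== VERDICT (by name: the statement is the Claim_ definition above) =====
theorem merge_positions_py_spec : Claim_equal_merge_positions_py := by
  unfold Claim_equal_merge_positions_py
  intro values tolerance _
  by_cases hne : values = []
  · subst hne
    simp [Spec_merge_positions_py, merge_positions_py, merge_positions_py_alt,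
      pvMergeLoopF]
  · simp only [Spec_merge_positions_py, merge_positions_py, merge_positions_py_alt,
      if_neg hne]
    set sv := PySem.List.sorted values (fun x => x) false with hsv
    have hlst : sv ≠ [] := fun h =>
      hne ((PySem.List.sorted_eq_nil_iff values (fun x => x) false).mp (hsv ▸ h))
    have hlen : 0 < sv.length := List.length_pos_iff.mpr hlst
    rw [PySem.List.slice_from_one, ← List.drop_one]
    rw [show [sv.getD 0 0] = [] ++ [sv.getD 0 0] from rfl,
        pvFold_eq_greedy tolerance (sv.drop 1) [] (sv.getD 0 0)]
    rw [pvMergeLoopF_eq_greedy sv tolerance (hsv ▸ pvMono_sorted values) sv.length 0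
      (by omega) hlen]
    simp
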